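-- pv_equiv track=rewrite | github.com/thiru5111/dna-cryptography-using_mealy_machine_concept | Key_Generation.py | zigzag_model
-- ===== SOURCE A (Python) =====
-- def zigzag_model(em,pn):
--     z = []
--     for i in range(len(em)):
--         if i < len(pn):
--             z.append(pn[i])
--         if i < len(em):
--             z.append(em[i])
--     return z
-- ===== SOURCE B (Python) =====
-- def zigzag_model(em, pn):
--     m = min(len(em), len(pn))
--     return [(pn[j // 2] if j % 2 == 0 else em[j // 2]) if j < 2 * m else em[j - m]
--             for j in range(len(em) + m)]
-- ===== Notes on version B (the rewrite author's own statement) =====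
-- stated objective: alternative
-- what changed: Replaces A's sequential append loop (with its per-index bounds checks) by a closed-form positional construction: the output length len(em)+min(len(em),len(pn)) is computed up front and each output slot j is filled directly by index arithmetic (pn[j//2] / em[j//2] in the interleaved zone, em[j-m] in the tail).
import Mathlib
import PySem

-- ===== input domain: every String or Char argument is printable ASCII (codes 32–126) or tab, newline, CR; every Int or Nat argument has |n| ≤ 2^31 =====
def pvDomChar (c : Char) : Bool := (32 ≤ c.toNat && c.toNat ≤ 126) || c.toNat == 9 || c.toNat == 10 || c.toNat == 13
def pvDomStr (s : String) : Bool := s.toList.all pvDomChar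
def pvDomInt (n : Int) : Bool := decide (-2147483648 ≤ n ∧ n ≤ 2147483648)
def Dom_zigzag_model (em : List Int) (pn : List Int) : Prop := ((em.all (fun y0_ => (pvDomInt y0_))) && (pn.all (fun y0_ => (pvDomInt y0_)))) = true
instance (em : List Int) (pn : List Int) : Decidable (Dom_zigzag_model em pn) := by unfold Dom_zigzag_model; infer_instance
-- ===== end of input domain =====

-- B replaces A's sequential append loop by a closed-form positional construction
-- (output length computed up front, each slot filled by index arithmetic): alternative algorithm, same cost.

-- ===== PORT A =====
def zigzag_model (em : List Int) (pn : List Int) : List Int :=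
  (PySem.List.pyRange 0 em.length 1).foldl (fun z i =>
    let z1 := if i < (pn.length : Int) then z ++ [PySem.List.pyGetD pn i 0] else z
    if i < (em.length : Int) then z1 ++ [PySem.List.pyGetD em i 0] else z1) []

-- ===== PORT B =====
-- j ranges over nonnegative indices only, so Nat range / division / mod / indexing
-- are exact transcriptions of Python's range, //, % and list indexing here
-- (every index used is in range, so getD's default is never taken).
def zigzag_model_alt (em : List Int) (pn : List Int) : List Int :=
  let m := min em.length pn.length
  (List.range (em.length + m)).map (fun j =>
    if j < 2 * m then (if j % 2 == 0 then pn.getD (j / 2) 0 else em.getD (j / 2) 0)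
    else em.getD (j - m) 0)

-- ===== PRECONDITION & SPEC =====
def Spec_zigzag_model (em : List Int) (pn : List Int) (out : List Int) : Prop := out = zigzag_model_alt em pn
instance (em : List Int) (pn : List Int) (out : List Int) : Decidable (Spec_zigzag_model em pn out) := by unfold Spec_zigzag_model; infer_instance

-- ===== CLAIM (what is proved, stated in full; the proofs are below) =====
def Claim_equal_zigzag_model : Prop := ∀ (em : List Int) (pn : List Int), Dom_zigzag_model em pn → Spec_zigzag_model em pn (zigzag_model em pn)

-- ===== LEMMAS AND PROOFS =====

-- the per-index chunk A's loop body appends for index i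
def pvChunk (em pn : List Int) (i : Int) : List Int :=
  (if i < (pn.length : Int) then [PySem.List.pyGetD pn i 0] else []) ++
  (if i < (em.length : Int) then [PySem.List.pyGetD em i 0] else [])

-- the canonical interleaving both programs compute
def pvZipFlat (pn em : List Int) : List Int :=
  (pn.zip em).flatMap fun pe => [pe.1, pe.2]

lemma pvFold_eq_flatMap (em pn : List Int) :
    zigzag_model em pn = (PySem.List.pyRange 0 em.length 1).flatMap (pvChunk em pn) := by
  unfold zigzag_model
  have h : ∀ (z : List Int) (i : Int), i ∈ PySem.List.pyRange 0 em.length 1 →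
      (let z1 := if i < (pn.length : Int) then z ++ [PySem.List.pyGetD pn i 0] else z
       if i < (em.length : Int) then z1 ++ [PySem.List.pyGetD em i 0] else z1)
      = z ++ pvChunk em pn i := by
    intro z i _
    simp only [pvChunk]
    split_ifs <;> simp
  exact (PySem.List.foldl_congr_mem _ _ _ _ h).trans (by rw [PySem.List.foldl_append_eq_flatMap]; simp)

lemma pvTail (em pn : List Int) (n : Nat) (k : Nat) (hn : em.length - k ≤ n) :
    (PySem.List.pyRange (k : Int) (em.length : Int) 1).flatMap (pvChunk em pn)
      = (((pn.drop k).zip (em.drop k)).flatMap fun pe => [pe.1, pe.2]) ++ em.drop (max k pn.length) := by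
  induction n generalizing k with
  | zero =>
    have hk : em.length ≤ k := by omega
    rw [PySem.List.pyRange_one_eq_nil (by exact_mod_cast hk)]
    have h1 : em.drop k = [] := List.drop_eq_nil_of_le hk
    have h2 : em.drop (max k pn.length) = [] := List.drop_eq_nil_of_le (le_trans hk (le_max_left _ _))
    simp [h1, h2]
  | succ n ih =>
    by_cases hk : k < em.length
    · have hcons := PySem.List.pyRange_one_cons (a := (k : Int)) (b := (em.length : Int)) (by exact_mod_cast hk)
      have hstep : ((k : Int) + 1) = ((k + 1 : Nat) : Int) := by push_cast; ring
      have hem : em.drop k = em[k] :: em.drop (k + 1) := List.drop_eq_getElem_cons hk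
      have hemGetD : PySem.List.pyGetD em (k : Int) 0 = em[k] := by
        rw [PySem.List.pyGetD_natCast]; exact List.getD_eq_getElem _ _ hk
      have h2 : ((k : Int)) < (em.length : Int) := by exact_mod_cast hk
      rw [hcons, List.flatMap_cons, hstep, ih (k + 1) (by omega)]
      by_cases hp : k < pn.length
      · have hpn : pn.drop k = pn[k] :: pn.drop (k + 1) := List.drop_eq_getElem_cons hp
        have hpnGetD : PySem.List.pyGetD pn (k : Int) 0 = pn[k] := by
          rw [PySem.List.pyGetD_natCast]; exact List.getD_eq_getElem _ _ hp
        have h1 : ((k : Int)) < (pn.length : Int) := by exact_mod_cast hp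
        have hmaxeq : max (k + 1) pn.length = pn.length := by omega
        have hmax : max k pn.length = pn.length := by omega
        rw [hmax, hmaxeq]
        simp only [pvChunk]
        simp [h1, h2, hemGetD, hpnGetD]
        simp only [hpn, hem, List.zip_cons_cons, List.flatMap_cons]
        simp
      · have hd1 : pn.drop k = [] := List.drop_eq_nil_of_le (by omega)
        have hd2 : pn.drop (k + 1) = [] := List.drop_eq_nil_of_le (by omega)
        have hmax : max k pn.length = k := by omega
        have hmax' : max (k + 1) pn.length = k + 1 := by omega
        have hnp : ¬ ((k : Int) < (pn.length : Int)) := by exact_mod_cast hp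
        rw [hmax, hmax', hd1, hd2]
        simp only [pvChunk]
        simp [hnp, h2, hemGetD]
    · rw [PySem.List.pyRange_one_eq_nil (by exact_mod_cast (by omega : em.length ≤ k))]
      have h1 : em.drop k = [] := List.drop_eq_nil_of_le (by omega)
      have h2 : em.drop (max k pn.length) = [] := List.drop_eq_nil_of_le (le_trans (by omega) (le_max_left _ _))
      simp [h1, h2]

lemma pvA_char (em pn : List Int) :
    zigzag_model em pn = pvZipFlat pn em ++ em.drop pn.length := by
  rw [pvFold_eq_flatMap]
  have h := pvTail em pn em.length 0 (by omega)
  simp only [Nat.cast_zero, List.drop_zero, Nat.zero_le, max_eq_right] at h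
  simpa [pvZipFlat] using h

lemma pvAlt_def (em pn : List Int) :
    zigzag_model_alt em pn =
      (List.range (em.length + min em.length pn.length)).map (fun j =>
        if j < 2 * min em.length pn.length then
          (if j % 2 == 0 then pn.getD (j / 2) 0 else em.getD (j / 2) 0)
        else em.getD (j - min em.length pn.length) 0) := rfl

lemma pvMapGetD (l : List Int) :
    (List.range l.length).map (fun j => l.getD j 0) = l := by
  apply List.ext_getElem
  · simp
  · intro i h1 h2
    simp [List.getD_eq_getElem?_getD, List.getElem?_eq_getElem h2]

lemma pvB_char (em pn : List Int) :
    zigzag_model_alt em pn = pvZipFlat pn em ++ em.drop pn.length := by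
  induction em generalizing pn with
  | nil => simp [zigzag_model_alt, pvZipFlat]
  | cons e em' ih =>
    cases pn with
    | nil =>
      rw [pvAlt_def]
      simp only [List.length_nil, Nat.min_zero, Nat.add_zero, pvZipFlat, List.drop_zero]
      simpa using pvMapGetD (e :: em')
    | cons p pn' =>
      have hm : min (e :: em').length (p :: pn').length = min em'.length pn'.length + 1 := by
        simp [Nat.succ_min_succ]
      set m' := min em'.length pn'.length with hm'
      have hN : (e :: em').length + min (e :: em').length (p :: pn').length
          = (em'.length + m') + 1 + 1 := by
        rw [hm]; simp; omega
      rw [pvAlt_def, hN, List.range_succ_eq_map, List.range_succ_eq_map]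
      simp only [List.map_cons, List.map_map]
      have hshift : ((fun j =>
            if j < 2 * min (e :: em').length (p :: pn').length then
              (if j % 2 == 0 then (p :: pn').getD (j / 2) 0 else (e :: em').getD (j / 2) 0)
            else (e :: em').getD (j - min (e :: em').length (p :: pn').length) 0)
          ∘ (fun x => x + 1) ∘ (fun x => x + 1))
          = (fun j =>
            if j < 2 * m' then
              (if j % 2 == 0 then pn'.getD (j / 2) 0 else em'.getD (j / 2) 0)
            else em'.getD (j - m') 0) := by
        funext j
        simp only [Function.comp, hm]
        have hlt : (j + 1 + 1 < 2 * (m' + 1)) ↔ (j < 2 * m') := by omega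
        have hmod : (j + 1 + 1) % 2 = j % 2 := by omega
        have hdiv : (j + 1 + 1) / 2 = j / 2 + 1 := by omega
        by_cases h : j < 2 * m'
        · simp [hlt.mpr h, h, hmod, hdiv]
        · have h' : ¬ (j + 1 + 1 < 2 * (m' + 1)) := by omega
          have hsub : j + 1 + 1 - (m' + 1) = (j - m') + 1 := by omega
          simp [h', h, hsub]
      have hIH := ih pn'
      rw [pvAlt_def, ← hm'] at hIH
      rw [hshift, hIH]
      have hc0 : (0 : Nat) < 2 * min (e :: em').length (p :: pn').length := by rw [hm]; omega
      have hc1 : (1 : Nat) < 2 * min (e :: em').length (p :: pn').length := by rw [hm]; omega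
      simp only [if_pos hc0, if_pos hc1]
      simp [pvZipFlat]

-- ===== VERDICT (by name: the statement is the Claim_ definition above) =====
theorem zigzag_model_spec : Claim_equal_zigzag_model := by
  intro em pn _
  unfold Spec_zigzag_model
  rw [pvA_char, pvB_char]
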